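-- pv_equiv track=rewrite | github.com/LukeAWarren/adventofcode | 2024/aoc_day_09_part_1.py | get_disk_layout
-- ===== SOURCE A (Python) =====
-- def get_disk_layout(dense_format):
--     disk_layout = ""
--     file_id = 0
--     for ndx in range(0, len(dense_format)):
--         if ndx % 2 == 0:
--             disk_layout += str(file_id) * dense_format[ndx]
--             file_id += 1
--         else:
--             disk_layout += "." * dense_format[ndx]
--     return disk_layout
-- ===== SOURCE B (Python) =====
-- def get_disk_layout(dense_format):
--     # Pre-size pass: the printed width of each run (file runs print str(id), gaps print ".").
--     sizes = [(len(str(i // 2)) if i % 2 == 0 else 1) * max(c, 0)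
--              for i, c in enumerate(dense_format)]
--     # Allocate the whole layout as dots, then overwrite only the file runs in place.
--     buf = bytearray(b"." * sum(sizes))
--     start = 0
--     for (i, c), size in zip(enumerate(dense_format), sizes):
--         if i % 2 == 0:
--             buf[start:start + size] = str(i // 2).encode() * c
--         start += size
--     return buf.decode()
-- ===== Notes on version B (the rewrite author's own statement) =====
-- stated objective: alternative
-- what changed: A appends each run (file id repeated, or dots) to a growing string in one pass; B first computes the printed size of every run, allocates the entire layout as dots, and then overwrites only the file runs in place at their computed offsets, leaving the gaps untouched.
import Mathlib
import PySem

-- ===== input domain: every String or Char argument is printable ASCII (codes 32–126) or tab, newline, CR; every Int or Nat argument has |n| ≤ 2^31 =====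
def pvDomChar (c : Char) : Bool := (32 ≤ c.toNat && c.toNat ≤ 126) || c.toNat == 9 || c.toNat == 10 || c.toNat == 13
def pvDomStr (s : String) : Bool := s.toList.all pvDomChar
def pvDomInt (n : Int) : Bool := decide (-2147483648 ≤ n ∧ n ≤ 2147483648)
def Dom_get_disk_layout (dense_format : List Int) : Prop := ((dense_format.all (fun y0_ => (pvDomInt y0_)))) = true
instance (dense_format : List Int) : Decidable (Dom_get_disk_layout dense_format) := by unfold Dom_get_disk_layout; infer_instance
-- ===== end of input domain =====

-- B replaces A's append-as-you-go expansion by allocate-then-overwrite: a sizing pass computes each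
-- run's printed width, the whole layout is allocated as dots, and only the file runs are written in
-- place at their computed offsets (alternative decomposition, same cost).

-- ===== PORT A =====
-- A: one loop over all indices, parity test on the index, manually incremented file_id;
-- the for-over-range(len) visiting dense_format[ndx] is folded over the list carrying ndx in the state.
def get_disk_layout (dense_format : List Int) : String :=
  let r := dense_format.foldl
    (fun (st : List Char × Int × Int) x =>
      if PySem.Int.mod st.2.2 2 = 0 then
        (st.1 ++ PySem.List.pyRepeat (PySem.Int.toChars st.2.1) x, st.2.1 + 1, st.2.2 + 1)
      else
        (st.1 ++ PySem.List.pyRepeat ['.'] x, st.2.1, st.2.2 + 1))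
    ([], 0, 0)
  String.mk r.1

-- ===== PORT B =====
-- size of the run at (index i, count c): (len(str(i // 2)) if i % 2 == 0 else 1) * max(c, 0)
def pvSizeB (p : Int × Int) : Int :=
  (if PySem.Int.mod p.1 2 = 0 then PySem.Str.len (PySem.Int.toStr (PySem.Int.floordiv p.1 2)) else 1)
    * max p.2 0

-- loop body: on a file run, 'buf[start:start+size] = str(i // 2) * c' — the slice bounds are always
-- 0 ≤ start ≤ start+size ≤ len(buf) here, so take/drop is exactly Python's slice assignment; then 'start += size'.
def pvStepB (st : List Char × Int) (q : (Int × Int) × Int) : List Char × Int :=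
  if PySem.Int.mod q.1.1 2 = 0 then
    (st.1.take st.2.toNat
       ++ PySem.List.pyRepeat (PySem.Int.toChars (PySem.Int.floordiv q.1.1 2)) q.1.2
       ++ st.1.drop (st.2 + q.2).toNat,
     st.2 + q.2)
  else (st.1, st.2 + q.2)

def get_disk_layout_alt (dense_format : List Int) : String :=
  let sizes := (PySem.List.enumerate dense_format).map pvSizeB
  -- '["."] * sum(sizes)': the sum is nonnegative, so .toNat is exact
  let buf := List.replicate sizes.sum.toNat '.'
  let r := ((PySem.List.enumerate dense_format).zip sizes).foldl pvStepB (buf, 0)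
  String.mk r.1

-- ===== PRECONDITION & SPEC =====
def Spec_get_disk_layout (dense_format : List Int) (out : String) : Prop := out = get_disk_layout_alt dense_format
instance (dense_format : List Int) (out : String) : Decidable (Spec_get_disk_layout dense_format out) := by unfold Spec_get_disk_layout; infer_instance

-- ===== CLAIM =====
def Claim_equal_get_disk_layout : Prop := ∀ (dense_format : List Int), Dom_get_disk_layout dense_format → Spec_get_disk_layout dense_format (get_disk_layout dense_format)

-- ===== LEMMAS AND PROOFS =====

-- the layout, two runs (one file, one gap) at a time — common reference shape for both ports
def pvAltGo : List Int → Int → List Char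
  | [], _ => []
  | [f], fid => PySem.List.pyRepeat (PySem.Int.toChars fid) f
  | f :: g :: rest, fid =>
      PySem.List.pyRepeat (PySem.Int.toChars fid) f ++ PySem.List.pyRepeat ['.'] g ++ pvAltGo rest (fid + 1)

-- the run at (index i, count c), its length, and the runs of a whole enumerated suffix
def pvSeg (i c : Int) : List Char :=
  if PySem.Int.mod i 2 = 0 then PySem.List.pyRepeat (PySem.Int.toChars (PySem.Int.floordiv i 2)) c
  else List.replicate c.toNat '.'

def pvN (i c : Int) : Nat :=
  c.toNat * (if PySem.Int.mod i 2 = 0 then (PySem.Int.toChars (PySem.Int.floordiv i 2)).length else 1)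

def pvSegs (l : List Int) (s : Int) : List (List Char) :=
  (PySem.List.enumerate l s).map (fun p => pvSeg p.1 p.2)

def pvTot (l : List Int) (s : Int) : Nat :=
  ((PySem.List.enumerate l s).map (fun p => pvN p.1 p.2)).sum

theorem pv_mod_even (k : Int) : PySem.Int.mod (2 * k) 2 = 0 := by
  rw [PySem.Int.mod_eq_zero_iff_dvd]; exact ⟨k, rfl⟩

theorem pv_mod_odd (k : Int) : PySem.Int.mod (2 * k + 1) 2 ≠ 0 := by
  simp only [ne_eq, PySem.Int.mod_eq_zero_iff_dvd]; omega

theorem pv_fd (k : Int) : PySem.Int.floordiv (2 * k) 2 = k := by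
  rw [PySem.Int.floordiv_eq_ediv_of_pos (by norm_num)]; omega

theorem pv_repeat_length {α : Type} (xs : List α) (n : Int) :
    (PySem.List.pyRepeat xs n).length = n.toNat * xs.length := by
  simp [PySem.List.pyRepeat]

theorem pv_seg_length (i c : Int) : (pvSeg i c).length = pvN i c := by
  unfold pvSeg pvN
  split_ifs with h
  · rw [pv_repeat_length]
  · simp

theorem pv_sizeB_eq (p : Int × Int) : pvSizeB p = (pvN p.1 p.2 : Int) := by
  unfold pvSizeB pvN
  rw [PySem.Str.len_eq, PySem.Int.toList_toStr, ← Int.ofNat_toNat p.2]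
  split_ifs with h
  · push_cast; ring
  · push_cast; ring

-- A's fold produces pvAltGo (counter fid, index 2*fid)
theorem pv_key (l : List Int) (fid : Int) : ∀ (dl : List Char),
    (l.foldl
      (fun (st : List Char × Int × Int) x =>
        if PySem.Int.mod st.2.2 2 = 0 then
          (st.1 ++ PySem.List.pyRepeat (PySem.Int.toChars st.2.1) x, st.2.1 + 1, st.2.2 + 1)
        else
          (st.1 ++ PySem.List.pyRepeat ['.'] x, st.2.1, st.2.2 + 1))
      (dl, fid, 2 * fid)).1 = dl ++ pvAltGo l fid := by
  induction l, fid using pvAltGo.induct with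
  | case1 fid => intro dl; simp [pvAltGo]
  | case2 f fid =>
      intro dl
      rw [List.foldl_cons]
      rw [if_pos (pv_mod_even fid)]
      simp [pvAltGo]
  | case3 f g rest fid ih =>
      intro dl
      have h2 : (2 : Int) * fid + 1 + 1 = 2 * (fid + 1) := by ring
      rw [List.foldl_cons, List.foldl_cons]
      rw [if_pos (pv_mod_even fid)]
      rw [if_neg (pv_mod_odd fid)]
      rw [h2, ih]
      simp [pvAltGo]

-- pvAltGo is the flattened run list
theorem pv_alt_eq_segs (l : List Int) (fid : Int) : pvAltGo l fid = (pvSegs l (2 * fid)).flatten := by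
  induction l, fid using pvAltGo.induct with
  | case1 fid => simp [pvAltGo, pvSegs]
  | case2 f fid =>
      simp [pvAltGo, pvSegs, PySem.List.enumerate_cons, pvSeg]
  | case3 f g rest fid ih =>
      have h2 : (2 : Int) * fid + 1 + 1 = 2 * (fid + 1) := by ring
      simp only [pvAltGo, pvSegs, PySem.List.enumerate_cons, List.map_cons, List.flatten_cons, h2]
      rw [pvSeg, if_pos (pv_mod_even fid), pv_fd fid,
          pvSeg, if_neg (pv_mod_odd fid), ← PySem.List.pyRepeat_singleton ('.') g, ih, pvSegs,
          List.append_assoc]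

-- zipping a list with its own image under f pairs each element with its image
theorem pv_zip_map {α β : Type} (l : List α) (f : α → β) :
    l.zip (l.map f) = l.map (fun a => (a, f a)) := by
  induction l with
  | nil => rfl
  | cons x xs ih => simp [ih]

-- B's write loop turns the all-dots buffer into the flattened run list
theorem pv_fill (l : List Int) : ∀ (s : Int) (done : List Char),
    ((PySem.List.enumerate l s).foldl (fun st p => pvStepB st (p, pvSizeB p))
      (done ++ List.replicate (pvTot l s) '.', (done.length : Int))).1
    = done ++ (pvSegs l s).flatten := by
  induction l with
  | nil => intro s done; simp [PySem.List.enumerate, pvTot, pvSegs]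
  | cons c tl ih =>
      intro s done
      have htot : pvTot (c :: tl) s = pvN s c + pvTot tl (s + 1) := by
        simp [pvTot, PySem.List.enumerate_cons]
      have hsegs : (pvSegs (c :: tl) s).flatten = pvSeg s c ++ (pvSegs tl (s + 1)).flatten := by
        simp [pvSegs, PySem.List.enumerate_cons]
      rw [PySem.List.enumerate_cons, List.foldl_cons, htot, hsegs, List.replicate_add]
      have hstep : pvStepB
          (done ++ (List.replicate (pvN s c) '.' ++ List.replicate (pvTot tl (s + 1)) '.'),
            (done.length : Int)) ((s, c), pvSizeB (s, c))
          = ((done ++ pvSeg s c) ++ List.replicate (pvTot tl (s + 1)) '.',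
             ((done ++ pvSeg s c).length : Int)) := by
        unfold pvStepB
        rw [pv_sizeB_eq]
        dsimp only
        have hlen2 : ((done.length : Int) + ((pvN s c : Nat) : Int)) = ((done ++ pvSeg s c).length : Int) := by
          rw [List.length_append, pv_seg_length]; push_cast; ring
        by_cases h : PySem.Int.mod s 2 = 0
        · rw [if_pos h]
          have hto2 : ((done.length : Int) + ((pvN s c : Nat) : Int)).toNat = done.length + pvN s c := by
            omega
          rw [Int.toNat_natCast, hto2, List.take_left, hlen2]
          have hdrop : (done ++ (List.replicate (pvN s c) '.' ++ List.replicate (pvTot tl (s + 1)) '.')).drop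
              (done.length + pvN s c) = List.replicate (pvTot tl (s + 1)) '.' := by
            rw [← List.append_assoc]
            have hdone : (done ++ List.replicate (pvN s c) '.').length = done.length + pvN s c := by
              simp
            rw [← hdone, List.drop_left]
          rw [hdrop]
          have hseg : pvSeg s c = PySem.List.pyRepeat (PySem.Int.toChars (PySem.Int.floordiv s 2)) c := by
            rw [pvSeg, if_pos h]
          rw [hseg, List.append_assoc]
        · rw [if_neg h]
          have hseg : pvSeg s c = List.replicate c.toNat '.' := by rw [pvSeg, if_neg h]
          have hN : pvN s c = c.toNat := by rw [pvN, if_neg h, mul_one]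
          rw [hlen2, hseg, hN, List.append_assoc]
      rw [hstep, ← List.append_assoc]
      exact ih (s + 1) (done ++ pvSeg s c)

-- ===== VERDICT =====
theorem get_disk_layout_spec : Claim_equal_get_disk_layout := by
  intro l _
  unfold Spec_get_disk_layout get_disk_layout get_disk_layout_alt
  dsimp only
  -- A side
  have hA := pv_key l 0 []
  rw [mul_zero] at hA
  rw [hA, List.nil_append]
  -- B side: the zip of the enumeration with its size list is a map, and the fold runs over it
  rw [pv_zip_map, List.foldl_map]
  have hsum : ((PySem.List.enumerate l).map pvSizeB).sum.toNat = pvTot l 0 := by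
    have hmap : (PySem.List.enumerate l).map pvSizeB
        = ((PySem.List.enumerate l).map (fun p => pvN p.1 p.2)).map (fun n => ((n : Nat) : Int)) := by
      rw [List.map_map]; exact List.map_congr_left (fun p _ => pv_sizeB_eq p)
    rw [hmap, ← Nat.cast_list_sum, Int.toNat_natCast, pvTot]
  rw [hsum]
  have hfill := pv_fill l 0 []
  simp only [List.nil_append] at hfill
  simp only [List.length_nil, Nat.cast_zero] at hfill
  rw [hfill, pv_alt_eq_segs l 0, mul_zero]
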